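-- pv_equiv track=rewrite | github.com/leonardmarkgalivo/python_string_methods_manual_implementation | convert_to_uppercase_without_upper.py | convert_to_uppercase_without_upper
-- ===== SOURCE A (Python) =====
-- def convert_to_uppercase_without_upper(text):
--     # Convert each lowercase letter to uppercase using ASCII values
--     result = ""
--     for char in text:
--         if "a" <= char <= "z":
--             result += chr(ord(char) - 32)
--         else:
--             result += char
--     return result
-- ===== SOURCE B (Python) =====
-- _TABLE = str.maketrans({ord(c): ord(c) - 32 for c in "abcdefghijklmnopqrstuvwxyz"})
--
-- def convert_to_uppercase_without_upper(text):
--     return text.translate(_TABLE)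
-- ===== Notes on version B (the rewrite author's own statement) =====
-- stated objective: idiomatic
-- what changed: Replaces the explicit per-character loop with ASCII branch arithmetic and string concatenation by a translation table built once (maketrans) and a single str.translate call.
import Mathlib
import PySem

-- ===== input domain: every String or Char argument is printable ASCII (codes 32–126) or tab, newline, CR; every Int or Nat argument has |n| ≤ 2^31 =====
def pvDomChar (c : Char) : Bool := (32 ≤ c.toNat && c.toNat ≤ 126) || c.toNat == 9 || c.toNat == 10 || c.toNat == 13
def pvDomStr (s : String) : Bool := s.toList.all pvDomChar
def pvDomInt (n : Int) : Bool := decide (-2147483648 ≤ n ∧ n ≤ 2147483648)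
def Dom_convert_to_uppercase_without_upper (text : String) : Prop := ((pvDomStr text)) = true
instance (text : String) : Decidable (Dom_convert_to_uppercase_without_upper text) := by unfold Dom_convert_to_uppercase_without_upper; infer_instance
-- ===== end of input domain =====

-- B builds a lowercase→uppercase translation table once and does one table-driven
-- pass (str.translate), instead of A's per-character ASCII branch + concatenation loop.

-- ===== PORT A =====
-- result = ""; for char in text: if "a" <= char <= "z": result += chr(ord(char)-32) else: result += char
def convert_to_uppercase_without_upper (text : String) : String :=
  text.toList.foldl
    (fun result char =>
      if 'a' ≤ char ∧ char ≤ 'z' then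
        result ++ String.ofList [Char.ofNat (char.toNat - 32)]
      else
        result ++ String.ofList [char])
    ""

-- ===== PORT B =====
-- table = {ord(c): ord(c)-32 for c in "abcdefghijklmnopqrstuvwxyz"}; return text.translate(table)
def pvUpperTable : PySem.Dict Int Int :=
  PySem.Dict.ofList
    ("abcdefghijklmnopqrstuvwxyz".toList.map (fun c => ((c.toNat : Int), (c.toNat : Int) - 32)))

def convert_to_uppercase_without_upper_alt (text : String) : String :=
  String.ofList (text.toList.map (fun c =>
    match pvUpperTable.get? (c.toNat : Int) with
    | some v => Char.ofNat v.toNat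
    | none => c))

-- ===== PRECONDITION & SPEC =====
def Spec_convert_to_uppercase_without_upper (text : String) (out : String) : Prop := out = convert_to_uppercase_without_upper_alt text
instance (text : String) (out : String) : Decidable (Spec_convert_to_uppercase_without_upper text out) := by unfold Spec_convert_to_uppercase_without_upper; infer_instance

-- ===== CLAIM (what is proved, stated in full; the proofs are below) =====
def Claim_equal_convert_to_uppercase_without_upper : Prop := ∀ (text : String), Dom_convert_to_uppercase_without_upper text → Spec_convert_to_uppercase_without_upper text (convert_to_uppercase_without_upper text)

-- ===== LEMMAS AND PROOFS =====

-- B's per-character translation step, named for the proofs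
def pvStep (c : Char) : Char :=
  match pvUpperTable.get? (c.toNat : Int) with
  | some v => Char.ofNat v.toNat
  | none => c

set_option maxRecDepth 4000 in
theorem pvTbl_small : ∀ n < 123, pvUpperTable.get? ((n : Nat) : Int) =
    (if 97 ≤ n then some (((n : Nat) : Int) - 32) else none) := by decide

theorem pvUpperTable_get (k : Int) :
    pvUpperTable.get? k = if 97 ≤ k ∧ k ≤ 122 then some (k - 32) else none := by
  by_cases h : 97 ≤ k ∧ k ≤ 122
  · rw [if_pos h]
    have hk : k = ((k.toNat : Nat) : Int) := by omega
    rw [hk, pvTbl_small k.toNat (by omega), if_pos (by omega)]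
  · rw [if_neg h]
    rw [PySem.Dict.get?_eq_none_iff_not_mem_keys]
    intro hm
    have hkeys : pvUpperTable.keys =
        [97,98,99,100,101,102,103,104,105,106,107,108,109,110,111,112,113,
         114,115,116,117,118,119,120,121,122] := by rfl
    rw [hkeys] at hm
    simp only [List.mem_cons, List.not_mem_nil, or_false] at hm
    omega

-- per-character agreement of the two ports
theorem pv_char_step (c : Char) :
    (if 'a' ≤ c ∧ c ≤ 'z' then Char.ofNat (c.toNat - 32) else c) = pvStep c := by
  unfold pvStep
  rw [pvUpperTable_get]
  by_cases h : 'a' ≤ c ∧ c ≤ 'z'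
  · have h1 : 97 ≤ (c.toNat : Int) ∧ (c.toNat : Int) ≤ 122 := by
      obtain ⟨ha, hb⟩ := h
      rw [Char.le_def] at ha hb
      constructor <;> [exact_mod_cast ha; exact_mod_cast hb]
    rw [if_pos h, if_pos h1]
    have : ((c.toNat : Int) - 32).toNat = c.toNat - 32 := by omega
    simp [this]
  · have h1 : ¬ (97 ≤ (c.toNat : Int) ∧ (c.toNat : Int) ≤ 122) := by
      intro ⟨ha, hb⟩
      exact h ⟨Char.le_def.mpr (by exact_mod_cast ha), Char.le_def.mpr (by exact_mod_cast hb)⟩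
    rw [if_neg h, if_neg h1]

theorem pv_foldl_append (xs : List Char) (f : Char → Char) (acc : String) :
    xs.foldl (fun r c => r ++ String.ofList [f c]) acc = acc ++ String.ofList (xs.map f) := by
  induction xs generalizing acc with
  | nil => simp
  | cons x xs ih =>
    rw [List.foldl_cons, ih, List.map_cons,
      show f x :: xs.map f = [f x] ++ xs.map f from rfl]
    rw [String.append_assoc]
    congr 1
    apply String.ext
    simp

-- ===== VERDICT (by name: the statement is the Claim_ definition above) =====
theorem convert_to_uppercase_without_upper_spec : Claim_equal_convert_to_uppercase_without_upper := by
  intro text _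
  show convert_to_uppercase_without_upper text = convert_to_uppercase_without_upper_alt text
  have halt : convert_to_uppercase_without_upper_alt text
      = String.ofList (text.toList.map pvStep) := rfl
  have hf : (fun (result : String) (char : Char) =>
      if 'a' ≤ char ∧ char ≤ 'z' then
        result ++ String.ofList [Char.ofNat (char.toNat - 32)]
      else
        result ++ String.ofList [char])
      = (fun r c => r ++ String.ofList [pvStep c]) := by
    funext r c
    rw [← pv_char_step]
    split_ifs <;> rfl
  unfold convert_to_uppercase_without_upper
  rw [halt, hf, pv_foldl_append]
  simp
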